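-- pv_equiv track=rewrite | github.com/FatanehK/practice | Array/Max number of people.py | max_count_people_in_building
-- ===== SOURCE A (Python) =====
-- def max_count_people_in_building(building):
--     count = 0
--     max_count = 0
--     for element in building:
--         if element == "o":
--             count += 1
--         elif element == ".":
--             continue
--         else:
--             count = 0
--         max_count = max(max_count, count)
--     return max_count
-- ===== SOURCE B (Python) =====
-- def max_count_people_in_building(building):
--     # dots are transparent: drop them, then consume maximal runs of "o"
--     stack = [e for e in building if e != "."]
--     stack.reverse()  # pop() from the end == consume from the front, O(1) each
--     best = 0
--     while stack:
--         run = 0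
--         while stack and stack[-1] == "o":
--             run += 1
--             stack.pop()
--         best = max(best, run)
--         if stack:
--             stack.pop()  # the non-"o" separator that ended the run
--     return best
-- ===== Notes on version B (the rewrite author's own statement) =====
-- stated objective: alternative
-- what changed: B first filters out the transparent '.' elements, then consumes each maximal run of 'o' wholesale with a nested pop loop and takes the max over whole runs, instead of A's single pass maintaining a count/reset accumulator and a per-element max update.
import Mathlib
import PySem

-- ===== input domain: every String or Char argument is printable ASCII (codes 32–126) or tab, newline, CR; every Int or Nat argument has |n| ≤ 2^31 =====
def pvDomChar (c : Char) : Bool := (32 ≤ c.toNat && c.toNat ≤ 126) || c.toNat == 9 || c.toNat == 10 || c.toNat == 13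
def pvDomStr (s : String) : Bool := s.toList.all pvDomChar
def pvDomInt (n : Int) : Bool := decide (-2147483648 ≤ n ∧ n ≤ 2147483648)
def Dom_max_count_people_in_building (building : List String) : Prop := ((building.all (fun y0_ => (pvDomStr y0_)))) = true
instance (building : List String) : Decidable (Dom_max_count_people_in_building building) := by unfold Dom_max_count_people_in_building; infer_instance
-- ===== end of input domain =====

-- B filters out the transparent "." elements first, then consumes each maximal run
-- of "o" wholesale with a nested loop and maxes over whole runs, instead of A's
-- per-element count/reset accumulator (objective: alternative; B mutates only its
-- own local list, never the argument).

-- ===== PORT A =====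
-- A's for loop as structural recursion over the same state (count, max_count);
-- the "." branch is Python's `continue`, which skips the max update too
def aLoop : List String → Int → Int → Int
  | [], _, max_count => max_count
  | element :: rest, count, max_count =>
    if element = "o" then aLoop rest (count + 1) (max max_count (count + 1))
    else if element = "." then aLoop rest count max_count
    else aLoop rest 0 (max max_count 0)

def max_count_people_in_building (building : List String) : Int :=
  aLoop building 0 0

-- ===== PORT B =====
-- inner `while stack and stack[-1] == "o"` loop of Source B: (run, remaining stack);
-- Source B's stack is the reversed filtered list, so its pop end is this list's front
def takeRun : List String → Int × List String
  | [] => (0, [])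
  | x :: t => if x = "o" then let p := takeRun t; (p.1 + 1, p.2) else (0, x :: t)

-- termination helper; the outer loop's decreasing_by cites it
theorem takeRun_len : ∀ (xs : List String), (takeRun xs).2.length ≤ xs.length := by
  intro xs
  induction xs with
  | nil => simp [takeRun]
  | cons x t ih =>
    simp only [takeRun]
    split
    · simpa using Nat.le_succ_of_le ih
    · simp

-- outer `while stack:` loop of Source B, carrying best
def scanRuns (xs : List String) (best : Int) : Int :=
  match xs with
  | [] => best
  | x :: t =>
    let p := takeRun (x :: t)
    let best' := max best p.1
    match h2 : p.2 with
    | [] => best'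
    | _ :: t' => scanRuns t' best'
termination_by xs.length
decreasing_by
  have hl := takeRun_len (x :: t)
  rw [h2] at hl
  simp only [List.length_cons] at hl ⊢
  omega

def max_count_people_in_building_alt (building : List String) : Int :=
  scanRuns (building.filter (fun e => e ≠ ".")) 0

-- ===== PRECONDITION & SPEC =====
def Spec_max_count_people_in_building (building : List String) (out : Int) : Prop := out = max_count_people_in_building_alt building
instance (building : List String) (out : Int) : Decidable (Spec_max_count_people_in_building building out) := by unfold Spec_max_count_people_in_building; infer_instance

-- ===== CLAIM (what is proved, stated in full; the proofs are below) =====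
def Claim_equal_max_count_people_in_building : Prop := ∀ (building : List String), Dom_max_count_people_in_building building → Spec_max_count_people_in_building building (max_count_people_in_building building)

-- ===== LEMMAS AND PROOFS =====

-- proof-side reference: longest "o"-run of a dot-free list, the leading run
-- already credited c
def hRun : List String → Int → Int
  | [], c => c
  | x :: t, c => if x = "o" then hRun t (c + 1) else max c (hRun t 0)

theorem hRun_ge : ∀ (xs : List String) (c : Int), c ≤ hRun xs c := by
  intro xs
  induction xs with
  | nil => intro c; simp [hRun]
  | cons x t ih =>
    intro c
    simp only [hRun]
    split
    · have := ih (c + 1); omega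
    · omega

theorem takeRun_nonneg : ∀ (xs : List String), 0 ≤ (takeRun xs).1 := by
  intro xs
  induction xs with
  | nil => simp [takeRun]
  | cons x t ih =>
    simp only [takeRun]
    split
    · simp; omega
    · simp

-- A's loop skips dots, so filtering them out first does not change it
theorem aLoop_filter : ∀ (xs : List String) (c m : Int),
    aLoop xs c m = aLoop (xs.filter (fun e => e ≠ ".")) c m := by
  intro xs
  induction xs with
  | nil => intro c m; rfl
  | cons x t ih =>
    intro c m
    by_cases hx : x = "o"
    · simp [aLoop, hx, List.filter, ih]
    · by_cases hd : x = "."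
      · simp [aLoop, hd, List.filter, ih]
      · simp [aLoop, hd, List.filter, ih]

-- A's loop on a dot-free list computes max m (hRun xs c)
theorem aLoop_eq_hRun : ∀ (xs : List String) (c m : Int),
    (∀ e ∈ xs, e ≠ ".") → 0 ≤ c → c ≤ m → aLoop xs c m = max m (hRun xs c) := by
  intro xs
  induction xs with
  | nil => intro c m _ _ h; simp [aLoop, hRun]; omega
  | cons x t ih =>
    intro c m hnd hc hcm
    have hnd' : ∀ e ∈ t, e ≠ "." := fun e he => hnd e (List.mem_cons_of_mem _ he)
    by_cases hx : x = "o"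
    · have hg := hRun_ge t (c + 1)
      rw [show aLoop (x :: t) c m = aLoop t (c + 1) (max m (c + 1)) by simp [aLoop, hx]]
      rw [ih (c + 1) (max m (c + 1)) hnd' (by omega) (by omega)]
      rw [show hRun (x :: t) c = hRun t (c + 1) by simp [hRun, hx]]
      omega
    · have hd : x ≠ "." := hnd x (List.mem_cons_self)
      have hg := hRun_ge t (0 : Int)
      rw [show aLoop (x :: t) c m = aLoop t 0 (max m 0) by simp [aLoop, hx, hd]]
      rw [ih 0 (max m 0) hnd' (by omega) (by omega)]
      rw [show hRun (x :: t) c = max c (hRun t 0) by simp [hRun, hx]]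
      omega

-- hRun factored through takeRun (the run decomposition B's port performs)
theorem hRun_takeRun : ∀ (xs : List String) (c : Int),
    hRun xs c = (match (takeRun xs).2 with
      | [] => c + (takeRun xs).1
      | _ :: t' => max (c + (takeRun xs).1) (hRun t' 0)) := by
  intro xs
  induction xs with
  | nil => intro c; simp [hRun, takeRun]
  | cons x t ih =>
    intro c
    by_cases hx : x = "o"
    · rw [show hRun (x :: t) c = hRun t (c + 1) by simp [hRun, hx]]
      rw [ih (c + 1)]
      rw [show takeRun (x :: t) = ((takeRun t).1 + 1, (takeRun t).2) by simp [takeRun, hx]]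
      cases h2 : (takeRun t).2 with
      | nil => simp; ring
      | cons y t' => simp only; rw [show c + 1 + (takeRun t).1 = c + ((takeRun t).1 + 1) by ring]
    · rw [show hRun (x :: t) c = max c (hRun t 0) by simp [hRun, hx]]
      rw [show takeRun (x :: t) = (0, x :: t) by simp [takeRun, hx]]
      simp

theorem scanRuns_eq_aux : ∀ (n : Nat) (xs : List String), xs.length ≤ n →
    ∀ (best : Int), 0 ≤ best → scanRuns xs best = max best (hRun xs 0) := by
  intro n
  induction n with
  | zero =>
    intro xs h best hb
    have hx : xs = [] := by cases xs <;> simp_all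
    subst hx
    simp [scanRuns, hRun]
    omega
  | succ n ih =>
    intro xs h best hb
    cases xs with
    | nil => simp [scanRuns, hRun]; omega
    | cons x t =>
      rw [scanRuns]
      have hnn := takeRun_nonneg (x :: t)
      cases h2 : (takeRun (x :: t)).2 with
      | nil =>
        show max best (takeRun (x :: t)).1 = max best (hRun (x :: t) 0)
        rw [hRun_takeRun]
        simp only [h2]
        simp
      | cons y t' =>
        show scanRuns t' (max best (takeRun (x :: t)).1) = max best (hRun (x :: t) 0)
        have hl := takeRun_len (x :: t)
        rw [h2] at hl
        simp only [List.length_cons] at hl h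
        rw [ih t' (by omega) _ (by omega)]
        rw [hRun_takeRun (x :: t)]
        simp only [h2, zero_add]
        rw [max_assoc]

-- ===== VERDICT (by name: the statement is the Claim_ definition above) =====
theorem max_count_people_in_building_spec : Claim_equal_max_count_people_in_building := by
  intro building _
  unfold Spec_max_count_people_in_building max_count_people_in_building max_count_people_in_building_alt
  rw [aLoop_filter]
  have hnd : ∀ e ∈ building.filter (fun e => e ≠ "."), e ≠ "." := by
    intro e he
    simpa using (List.mem_filter.mp he).2
  rw [aLoop_eq_hRun _ 0 0 hnd le_rfl le_rfl]
  rw [scanRuns_eq_aux (building.filter (fun e => e ≠ ".")).length _ le_rfl 0 le_rfl]
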